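-- pv_equiv track=rewrite | github.com/AbhinashGunda/gui | gui.py | parse_hierarchical_pairs
-- ===== SOURCE A (Python) =====
-- def parse_hierarchical_pairs(pairs):
--     """
--     Given list of (key, value) pairs like ('author>name','Alice'), ('book>title','X')
--     Produce lists of author dicts and book dicts.
--     Heuristic: when encountering an 'author>name' while a current_author exists -> start new author.
--                when encountering a 'book>title' while current_book exists -> start new book.
--     """
--     authors = []
--     books = []
--     cur_a = {}
--     cur_b = {}
--     for k, v in pairs:
--         if ">" not in k: continue
--         ent, fld = [x.strip() for x in k.split(">", 1)]
--         if ent.lower() == "author":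
--             # start new author if we see name and cur_a already has data
--             if fld.lower() == "name" and cur_a:
--                 authors.append(cur_a); cur_a = {}
--             cur_a[fld.lower()] = v
--         elif ent.lower() == "book":
--             if fld.lower() == "title" and cur_b:
--                 books.append(cur_b); cur_b = {}
--             cur_b[fld.lower()] = v
--         else:
--             # ignore unknown prefixes for now
--             pass
--     if cur_a: authors.append(cur_a)
--     if cur_b: books.append(cur_b)
--     return authors, books
-- ===== SOURCE B (Python) =====
-- def parse_hierarchical_pairs(pairs):
--     """Two-phase rewrite: split the stream into an author stream and a book
--     stream of (lowercased field, value) items, then group each stream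
--     independently with one generic helper."""
--     author_items = []
--     book_items = []
--     for k, v in pairs:
--         if ">" not in k:
--             continue
--         ent, fld = k.split(">", 1)
--         ent = ent.strip().lower()
--         if ent == "author":
--             author_items.append((fld.strip().lower(), v))
--         elif ent == "book":
--             book_items.append((fld.strip().lower(), v))
--     return _group(author_items, "name"), _group(book_items, "title")
--
--
-- def _group(items, start_field):
--     out = []
--     cur = {}
--     for fld, v in items:
--         if fld == start_field and cur:
--             out.append(cur)
--             cur = {}
--         cur[fld] = v
--     if cur:
--         out.append(cur)
--     return out
-- ===== Notes on version B (the rewrite author's own statement) =====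
-- stated objective: simpler
-- what changed: Replaces the single interleaved loop carrying four state variables with a two-phase decomposition: one pass partitions the pairs into an author item stream and a book item stream, then one generic grouping helper (start-field delimited) is applied to each stream.
import Mathlib
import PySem

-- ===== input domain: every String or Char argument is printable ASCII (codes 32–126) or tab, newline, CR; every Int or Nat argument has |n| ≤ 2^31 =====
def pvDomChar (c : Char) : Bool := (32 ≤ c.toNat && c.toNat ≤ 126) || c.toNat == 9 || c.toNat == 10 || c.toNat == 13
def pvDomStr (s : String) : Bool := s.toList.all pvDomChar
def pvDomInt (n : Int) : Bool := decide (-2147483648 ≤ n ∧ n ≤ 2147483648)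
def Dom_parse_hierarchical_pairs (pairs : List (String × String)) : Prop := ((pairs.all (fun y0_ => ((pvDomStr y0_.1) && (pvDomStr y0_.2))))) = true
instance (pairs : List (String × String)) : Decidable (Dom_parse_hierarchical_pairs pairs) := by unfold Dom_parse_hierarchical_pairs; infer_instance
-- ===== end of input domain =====

-- B replaces A's single interleaved loop (four state variables) by a partition pass into two
-- item streams plus one generic start-field grouping helper applied to each; objective: simpler.
set_option maxHeartbeats 1000000


-- ===== PORT A =====
-- A's loop body: state is (authors, books, cur_a, cur_b); dicts are PySem.Dict; appending a
-- finished dict stores its .items (the association list).  'authors.append(cur_a); cur_a = {}'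
-- followed by 'cur_a[fld.lower()] = v' is transcribed as inserting into the empty dict.
def pvStateA := (List (List (String × String))) × (List (List (String × String))) ×
  PySem.Dict String String × PySem.Dict String String

def pvStepA (st : pvStateA) (p : String × String) : pvStateA :=
  if PySem.Str.isIn ">" p.1 = false then st          -- if ">" not in k: continue
  else
    let parts := (PySem.Str.splitMax? p.1 ">" 1).getD []   -- k.split(">", 1)
    let ent := PySem.Str.strip (parts.getD 0 "")
    let fld := PySem.Str.strip (parts.getD 1 "")
    if PySem.Str.lower ent = "author" then
      if PySem.Str.lower fld = "name" ∧ st.2.2.1.items ≠ [] then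
        (st.1 ++ [st.2.2.1.items], st.2.1, PySem.Dict.empty.insert (PySem.Str.lower fld) p.2, st.2.2.2)
      else
        (st.1, st.2.1, st.2.2.1.insert (PySem.Str.lower fld) p.2, st.2.2.2)
    else if PySem.Str.lower ent = "book" then
      if PySem.Str.lower fld = "title" ∧ st.2.2.2.items ≠ [] then
        (st.1, st.2.1 ++ [st.2.2.2.items], st.2.2.1, PySem.Dict.empty.insert (PySem.Str.lower fld) p.2)
      else
        (st.1, st.2.1, st.2.2.1, st.2.2.2.insert (PySem.Str.lower fld) p.2)
    else st

def parse_hierarchical_pairs (pairs : List (String × String)) :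
    (List (List (String × String))) × (List (List (String × String))) :=
  let st := pairs.foldl pvStepA ([], [], PySem.Dict.empty, PySem.Dict.empty)
  ((if st.2.2.1.items = [] then st.1 else st.1 ++ [st.2.2.1.items]),
   (if st.2.2.2.items = [] then st.2.1 else st.2.1 ++ [st.2.2.2.items]))

-- ===== PORT B =====
-- _group(items, start_field) from Source B ('out.append(cur); cur = {}' then 'cur[fld] = v' is
-- transcribed as inserting into the empty dict, as in port A).
def pvGroupStep (start : String) (st : (List (List (String × String))) × PySem.Dict String String)
    (fv : String × String) : (List (List (String × String))) × PySem.Dict String String :=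
  if fv.1 = start ∧ st.2.items ≠ [] then
    (st.1 ++ [st.2.items], PySem.Dict.empty.insert fv.1 fv.2)
  else
    (st.1, st.2.insert fv.1 fv.2)

def pvGroup (items : List (String × String)) (start : String) : List (List (String × String)) :=
  let st := items.foldl (pvGroupStep start) ([], PySem.Dict.empty)
  if st.2.items = [] then st.1 else st.1 ++ [st.2.items]

-- partition pass of Source B: build the author item stream and the book item stream
def pvPartStep (st : List (String × String) × List (String × String)) (p : String × String) :
    List (String × String) × List (String × String) :=
  if PySem.Str.isIn ">" p.1 = false then st
  else
    let parts := (PySem.Str.splitMax? p.1 ">" 1).getD []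
    let ent := PySem.Str.lower (PySem.Str.strip (parts.getD 0 ""))
    let item := (PySem.Str.lower (PySem.Str.strip (parts.getD 1 "")), p.2)
    if ent = "author" then (st.1 ++ [item], st.2)
    else if ent = "book" then (st.1, st.2 ++ [item])
    else st

def parse_hierarchical_pairs_alt (pairs : List (String × String)) :
    (List (List (String × String))) × (List (List (String × String))) :=
  let st := pairs.foldl pvPartStep ([], [])
  (pvGroup st.1 "name", pvGroup st.2 "title")

-- ===== PRECONDITION & SPEC =====
def Spec_parse_hierarchical_pairs (pairs : List (String × String)) (out : (List (List (String × String))) × (List (List (String × String)))) : Prop := out = parse_hierarchical_pairs_alt pairs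
instance (pairs : List (String × String)) (out : (List (List (String × String))) × (List (List (String × String)))) : Decidable (Spec_parse_hierarchical_pairs pairs out) := by unfold Spec_parse_hierarchical_pairs; infer_instance

-- ===== CLAIM (what is proved, stated in full; the proofs are below) =====
def Claim_equal_parse_hierarchical_pairs : Prop := ∀ (pairs : List (String × String)), Dom_parse_hierarchical_pairs pairs → Spec_parse_hierarchical_pairs pairs (parse_hierarchical_pairs pairs)

-- ===== LEMMAS AND PROOFS =====

-- proof-side classification of one pair: none = skipped, some (true, item) = author, some (false, item) = book
def pvCls (p : String × String) : Option (Bool × String × String) :=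
  if PySem.Str.isIn ">" p.1 = false then none
  else
    let parts := (PySem.Str.splitMax? p.1 ">" 1).getD []
    let ent := PySem.Str.lower (PySem.Str.strip (parts.getD 0 ""))
    let item := (PySem.Str.lower (PySem.Str.strip (parts.getD 1 "")), p.2)
    if ent = "author" then some (true, item)
    else if ent = "book" then some (false, item)
    else none

def pvAItems (pairs : List (String × String)) : List (String × String) :=
  pairs.filterMap (fun p => match pvCls p with | some (true, it) => some it | _ => none)
def pvBItems (pairs : List (String × String)) : List (String × String) :=
  pairs.filterMap (fun p => match pvCls p with | some (false, it) => some it | _ => none)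

theorem pvPartStep_eq (st : List (String × String) × List (String × String)) (p : String × String) :
    pvPartStep st p = match pvCls p with
      | none => st
      | some (true, it) => (st.1 ++ [it], st.2)
      | some (false, it) => (st.1, st.2 ++ [it]) := by
  unfold pvPartStep pvCls
  by_cases h0 : PySem.Str.isIn ">" p.1 = false
  · simp only [if_pos h0]
  · simp only [if_neg h0]
    by_cases h1 : PySem.Str.lower (PySem.Str.strip (((PySem.Str.splitMax? p.1 ">" 1).getD []).getD 0 "")) = "author"
    · simp only [if_pos h1]
    · simp only [if_neg h1]
      by_cases h2 : PySem.Str.lower (PySem.Str.strip (((PySem.Str.splitMax? p.1 ">" 1).getD []).getD 0 "")) = "book"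
      · simp only [if_pos h2]
      · simp only [if_neg h2]

theorem pvStepA_eq (st : pvStateA) (p : String × String) :
    pvStepA st p = match pvCls p with
      | none => st
      | some (true, it) =>
          let g := pvGroupStep "name" (st.1, st.2.2.1) it
          (g.1, st.2.1, g.2, st.2.2.2)
      | some (false, it) =>
          let g := pvGroupStep "title" (st.2.1, st.2.2.2) it
          (st.1, g.1, st.2.2.1, g.2) := by
  unfold pvStepA pvCls pvGroupStep
  by_cases h0 : PySem.Str.isIn ">" p.1 = false
  · simp only [if_pos h0]
  · simp only [if_neg h0]
    by_cases h1 : PySem.Str.lower (PySem.Str.strip (((PySem.Str.splitMax? p.1 ">" 1).getD []).getD 0 "")) = "author"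
    · simp only [if_pos h1]
      by_cases h2 : PySem.Str.lower (PySem.Str.strip (((PySem.Str.splitMax? p.1 ">" 1).getD []).getD 1 "")) = "name" ∧ st.2.2.1.items ≠ []
      · simp [h2]
        try split_ifs <;> rfl
      · simp
        try split_ifs <;> rfl
    · simp only [if_neg h1]
      by_cases h3 : PySem.Str.lower (PySem.Str.strip (((PySem.Str.splitMax? p.1 ">" 1).getD []).getD 0 "")) = "book"
      · simp only [if_pos h3]
        by_cases h4 : PySem.Str.lower (PySem.Str.strip (((PySem.Str.splitMax? p.1 ">" 1).getD []).getD 1 "")) = "title" ∧ st.2.2.2.items ≠ []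
        · simp [h4]
          try split_ifs <;> rfl
        · simp
          try split_ifs <;> rfl
      · simp only [if_neg h3]

theorem pvPart_spec (pairs : List (String × String)) (sa sb : List (String × String)) :
    pairs.foldl pvPartStep (sa, sb) = (sa ++ pvAItems pairs, sb ++ pvBItems pairs) := by
  induction pairs generalizing sa sb with
  | nil => simp [pvAItems, pvBItems]
  | cons p rest ih =>
    simp only [List.foldl_cons, pvPartStep_eq]
    rcases h : pvCls p with _ | ⟨b, it⟩
    · simp [pvAItems, pvBItems, h, ih]
    · cases b <;> simp [pvAItems, pvBItems, h, ih]

theorem pvFoldA_spec (pairs : List (String × String)) (as bs : List (List (String × String)))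
    (ca cb : PySem.Dict String String) :
    pairs.foldl pvStepA (as, bs, ca, cb) =
      (((pvAItems pairs).foldl (pvGroupStep "name") (as, ca)).1,
       ((pvBItems pairs).foldl (pvGroupStep "title") (bs, cb)).1,
       ((pvAItems pairs).foldl (pvGroupStep "name") (as, ca)).2,
       ((pvBItems pairs).foldl (pvGroupStep "title") (bs, cb)).2) := by
  induction pairs generalizing as bs ca cb with
  | nil => simp [pvAItems, pvBItems]
  | cons p rest ih =>
    simp only [List.foldl_cons, pvStepA_eq]
    rcases h : pvCls p with _ | ⟨b, it⟩
    · simp [pvAItems, pvBItems, h, ih]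
    · cases b <;> simp [pvAItems, pvBItems, h, ih]

-- ===== VERDICT (by name: the statement is the Claim_ definition above) =====
theorem parse_hierarchical_pairs_spec : Claim_equal_parse_hierarchical_pairs := by
  intro pairs _
  unfold Spec_parse_hierarchical_pairs parse_hierarchical_pairs parse_hierarchical_pairs_alt pvGroup
  rw [pvFoldA_spec, pvPart_spec]
  simp
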